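-- pv_equiv track=rewrite | github.com/Have-pig/e-manager | hbdalfhb665g.py | aouifvafa
-- ===== SOURCE A (Python) =====
-- kv=["1", "2", "3", "4", "5", "6", "7", "8", "9", "0"]
--
-- def aouifvafa(password):
--     letter = ""
--     number = ""
--     for i in password:
--         if str(i) not in kv:
--             letter += str(i)
--         else:
--             number += str(i)
--     dealletter = ""
--     dealnumber = ""
--     for i in letter[::-1]:
--         dealletter += i
--     for i in number[::-1]:
--         dealnumber += i
--     return dealnumber+dealletter
-- ===== SOURCE B (Python) =====
-- kv=["1", "2", "3", "4", "5", "6", "7", "8", "9", "0"]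
--
-- def aouifvafa(password):
--     # Stable sort of the reversed sequence by a boolean key (digits first):
--     # stability keeps each group in reversed-input order, so the result is
--     # reversed-digits followed by reversed-letters.
--     return "".join(sorted(reversed(password), key=lambda i: str(i) not in kv))
-- ===== Notes on version B (the rewrite author's own statement) =====
-- stated objective: alternative
-- what changed: B replaces A's three explicit accumulation loops by one stable sort: it sorts reversed(password) by the boolean key `str(i) not in kv`, so stability yields the reversed digit group followed by the reversed letter group.
import Mathlib
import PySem

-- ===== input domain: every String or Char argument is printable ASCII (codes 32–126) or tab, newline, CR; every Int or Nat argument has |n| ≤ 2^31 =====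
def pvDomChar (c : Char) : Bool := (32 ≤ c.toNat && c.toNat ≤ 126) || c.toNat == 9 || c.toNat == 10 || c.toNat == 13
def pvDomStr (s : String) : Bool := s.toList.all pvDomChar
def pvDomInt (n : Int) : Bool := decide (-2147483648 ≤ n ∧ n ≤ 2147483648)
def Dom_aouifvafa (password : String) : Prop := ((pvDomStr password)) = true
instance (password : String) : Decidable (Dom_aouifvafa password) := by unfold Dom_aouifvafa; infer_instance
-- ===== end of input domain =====

-- B replaces A's three partition/reversal loops by one stable sort of the reversed
-- string keyed on digit-vs-letter (objective: alternative).


-- ===== PORT A =====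
-- kv = ["1", …, "0"]; iterating a Python string yields one-char strings, so the
-- membership test `str(i) not in kv` is exact as membership of the char in this char list.
def pvKv : List Char := ['1', '2', '3', '4', '5', '6', '7', '8', '9', '0']

def aouifvafa (password : String) : String :=
  -- first loop: build (letter, number)
  let st := password.toList.foldl
    (fun (p : List Char × List Char) i =>
      if pvKv.contains i = false then (p.1 ++ [i], p.2) else (p.1, p.2 ++ [i]))
    ([], [])
  -- letter[::-1] / number[::-1] copy loops
  let dealletter := st.1.reverse.foldl (fun acc i => acc ++ [i]) []
  let dealnumber := st.2.reverse.foldl (fun acc i => acc ++ [i]) []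
  String.mk (dealnumber ++ dealletter)

-- ===== PORT B =====
-- Python's boolean sort key (False < True) is ported as the Nat key 0/1 — exact.
def pvKey (i : Char) : Nat := if pvKv.contains i = false then 1 else 0

def aouifvafa_alt (password : String) : String :=
  String.mk (PySem.List.sorted password.toList.reverse pvKey)

-- ===== PRECONDITION & SPEC =====
def Spec_aouifvafa (password : String) (out : String) : Prop := out = aouifvafa_alt password
instance (password : String) (out : String) : Decidable (Spec_aouifvafa password out) := by unfold Spec_aouifvafa; infer_instance

-- ===== CLAIM (what is proved, stated in full; the proofs are below) =====
def Claim_equal_aouifvafa : Prop := ∀ (password : String), Dom_aouifvafa password → Spec_aouifvafa password (aouifvafa password)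

-- ===== LEMMAS AND PROOFS =====

theorem pv_copy_fold (l acc : List Char) :
    l.foldl (fun a i => a ++ [i]) acc = acc ++ l := by
  induction l generalizing acc with
  | nil => simp
  | cons c t ih => simp [List.foldl, ih, List.append_assoc]

theorem pv_split_fold (xs a b : List Char) :
    xs.foldl
      (fun (p : List Char × List Char) i =>
        if pvKv.contains i = false then (p.1 ++ [i], p.2) else (p.1, p.2 ++ [i]))
      (a, b)
    = (a ++ xs.filter (fun i => !pvKv.contains i),
       b ++ xs.filter (fun i => pvKv.contains i)) := by
  induction xs generalizing a b with
  | nil => simp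
  | cons c t ih =>
    by_cases h : pvKv.contains c = false
    · have hm : c ∉ pvKv := by simpa using h
      rw [List.foldl_cons, if_pos h, ih]
      simp [List.filter_cons, hm, List.append_assoc]
    · have hm : c ∈ pvKv := by simpa using h
      rw [List.foldl_cons, if_neg h, ih]
      simp [List.filter_cons, hm, List.append_assoc]

-- inserting a digit into (digits ++ letters) lands at the end of the digit block
theorem pv_insert_digit (x : Char) (hx : pvKey x = 0) (d l : List Char)
    (hd : ∀ y ∈ d, pvKey y = 0) (hl : ∀ y ∈ l, pvKey y = 1) :
    PySem.List.insertBy (fun a b => decide (pvKey a < pvKey b)) x (d ++ l)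
      = (d ++ [x]) ++ l := by
  induction d with
  | nil =>
    cases l with
    | nil => simp [PySem.List.insertBy]
    | cons y ys =>
      have : pvKey y = 1 := hl y (by simp)
      simp [PySem.List.insertBy, hx, this]
  | cons y d ih =>
    have hy : pvKey y = 0 := hd y (by simp)
    have ih' := ih (fun z hz => hd z (List.mem_cons_of_mem _ hz))
    simp only [List.cons_append, PySem.List.insertBy, hx, hy]
    simp [ih']

-- inserting a letter goes to the very end
theorem pv_insert_letter (x : Char) (hx : pvKey x = 1) (d l : List Char)
    (hd : ∀ y ∈ d, pvKey y = 0) (hl : ∀ y ∈ l, pvKey y = 1) :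
    PySem.List.insertBy (fun a b => decide (pvKey a < pvKey b)) x (d ++ l)
      = d ++ (l ++ [x]) := by
  rw [PySem.List.insertBy_of_forall_not_before, List.append_assoc]
  intro y hy
  rcases List.mem_append.mp hy with h | h
  · simp [hd y h, hx]
  · simp [hl y h, hx]

-- stable insertion sort by the 0/1 key is the stable partition
theorem pv_sorted_partition (xs : List Char) :
    PySem.List.sorted xs pvKey
      = xs.filter (fun i => pvKv.contains i) ++ xs.filter (fun i => !pvKv.contains i) := by
  rw [PySem.List.sorted_eq_foldl_insertBy]
  suffices h : ∀ (d l : List Char), (∀ y ∈ d, pvKey y = 0) → (∀ y ∈ l, pvKey y = 1) →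
      xs.foldl (fun acc x => PySem.List.insertBy (fun a b => decide (pvKey a < pvKey b)) x acc) (d ++ l)
        = (d ++ xs.filter (fun i => pvKv.contains i)) ++ (l ++ xs.filter (fun i => !pvKv.contains i)) by
    simpa using h [] [] (by simp) (by simp)
  induction xs with
  | nil => intro d l _ _; simp
  | cons c t ih =>
    intro d l hd hl
    by_cases hmem : c ∈ pvKv
    · have h : pvKv.contains c = true := by simpa using hmem
      have hk : pvKey c = 0 := by simp [pvKey, hmem]
      rw [List.foldl_cons, pv_insert_digit c hk d l hd hl,
        ih (d ++ [c]) l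
          (by intro y hy; rcases List.mem_append.mp hy with h' | h'
              · exact hd y h'
              · simp at h'; simpa [h', pvKey] using hk) hl]
      simp [List.filter_cons, hmem, List.append_assoc]
    · have h : pvKv.contains c = false := by simpa using hmem
      have hk : pvKey c = 1 := by simp [pvKey, hmem]
      rw [List.foldl_cons, pv_insert_letter c hk d l hd hl,
        ih d (l ++ [c]) hd
          (by intro y hy; rcases List.mem_append.mp hy with h' | h'
              · exact hl y h'
              · simp at h'; simpa [h', pvKey] using hk)]
      simp [List.filter_cons, hmem, List.append_assoc]

theorem pv_flat_singleton (l : List Char) :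
    (List.map (fun x => [x]) l).flatten = l := by
  induction l with
  | nil => simp
  | cons c t ih => simp [ih]

-- ===== VERDICT (by name: the statement is the Claim_ definition above) =====
theorem aouifvafa_spec : Claim_equal_aouifvafa := by
  intro password _
  unfold Spec_aouifvafa aouifvafa aouifvafa_alt
  rw [pv_split_fold, pv_sorted_partition]
  simp [pv_copy_fold, List.filter_reverse, ← List.map_reverse, pv_flat_singleton]
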